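-- pv_equiv track=rewrite | github.com/wmarizane/net-app | client/client.py | extract_temp_message
-- ===== SOURCE A (Python) =====
-- def extract_temp_message(input_str):
--     parts = input_str.strip().split()
--
--     if not parts or parts[0] != ".temp":
--         return None  # or raise an error
--
--     users = []
--     message_start_index = None
--
--     for i in range(1, len(parts)):
--         if parts[i].startswith('@'):
--             users.append(parts[i][1:])
--         else:
--             message_start_index = i
--             break
--
--     message = ' '.join(parts[message_start_index:]) if message_start_index is not None else ''
--
--     return  users, message
-- ===== SOURCE B (Python) =====
-- def extract_temp_message(input_str):
--     parts = input_str.strip().split()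
--     if not parts or parts[0] != ".temp":
--         return None
--
--     def peel(rest):
--         if rest and rest[0].startswith('@'):
--             users, message = peel(rest[1:])
--             return [rest[0][1:]] + users, message
--         return [], ' '.join(rest)
--
--     return peel(parts[1:])
-- ===== Notes on version B (the rewrite author's own statement) =====
-- stated objective: alternative
-- what changed: B replaces A's index loop with break flag and post-hoc slice/join by a structural recursion that consumes the token list: each @-token is peeled off and the user list is assembled on the unwind, the remaining suffix being joined directly as the message; no indices or break sentinel exist in B.
import Mathlib
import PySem

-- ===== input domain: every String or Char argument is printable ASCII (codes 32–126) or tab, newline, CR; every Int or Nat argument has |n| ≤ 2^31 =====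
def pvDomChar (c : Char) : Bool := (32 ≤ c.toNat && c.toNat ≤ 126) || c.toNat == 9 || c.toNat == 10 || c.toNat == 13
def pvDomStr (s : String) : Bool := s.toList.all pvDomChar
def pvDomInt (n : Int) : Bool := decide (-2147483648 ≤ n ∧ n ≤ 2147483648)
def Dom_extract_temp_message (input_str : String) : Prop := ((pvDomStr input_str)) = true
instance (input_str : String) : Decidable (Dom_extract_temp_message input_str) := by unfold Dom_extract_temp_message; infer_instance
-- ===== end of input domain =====

-- B replaces A's index loop (break flag + post-hoc slice/join) by a structural recursion that
-- consumes the token list, assembling the user list on the unwind; same return values.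

-- ===== PORT A =====
-- A's for-loop over range(1, len(parts)) with break: structural recursion over the index list,
-- carrying the users accumulator and returning the break index (message_start_index).
def pvLoopA (parts : List String) : List Int → List String → (List String × Option Int)
  | [], users => (users, none)
  | i :: rest, users =>
    let p := (PySem.List.pyGet? parts i).getD ""
    if PySem.Str.startswith p "@" then
      pvLoopA parts rest (users ++ [PySem.Str.slice p (some 1) none])
    else
      (users, some i)

def pvBodyA (parts : List String) : Option (List String × String) :=
  if parts = [] then none
  else if PySem.List.pyGet? parts 0 ≠ some ".temp" then none
  else
    let r := pvLoopA parts (PySem.List.pyRange 1 (parts.length : Int) 1) []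
    let message := match r.2 with
      | some i => PySem.Str.join " " (PySem.List.slice parts (some i) none)
      | none => ""
    some (r.1, message)

def extract_temp_message (input_str : String) : Option (List String × String) :=
  pvBodyA (PySem.Str.split₀ (PySem.Str.strip input_str))

-- ===== PORT B =====
-- peel(rest): strip leading '@'-tokens recursively, build users on the unwind,
-- join whatever remains as the message.
def pvPeel : List String → (List String × String)
  | [] => ([], PySem.Str.join " " [])
  | t :: ts =>
    if PySem.Str.startswith t "@" then
      let r := pvPeel ts
      (PySem.Str.slice t (some 1) none :: r.1, r.2)
    else
      ([], PySem.Str.join " " (t :: ts))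

def pvBodyB (parts : List String) : Option (List String × String) :=
  if parts = [] then none
  else if PySem.List.pyGet? parts 0 ≠ some ".temp" then none
  else some (pvPeel (PySem.List.slice parts (some 1) none))

def extract_temp_message_alt (input_str : String) : Option (List String × String) :=
  pvBodyB (PySem.Str.split₀ (PySem.Str.strip input_str))

-- ===== PRECONDITION & SPEC =====
def Spec_extract_temp_message (input_str : String) (out : Option (List String × String)) : Prop := out = extract_temp_message_alt input_str
instance (input_str : String) (out : Option (List String × String)) : Decidable (Spec_extract_temp_message input_str out) := by unfold Spec_extract_temp_message; infer_instance

-- ===== CLAIM (what is proved, stated in full; the proofs are below) =====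
def Claim_equal_extract_temp_message : Prop := ∀ (input_str : String), Dom_extract_temp_message input_str → Spec_extract_temp_message input_str (extract_temp_message input_str)

-- ===== LEMMAS AND PROOFS =====

-- A's message, as a function of the break index returned by the loop
def pvMsgA (parts : List String) : Option Int → String
  | some i => PySem.Str.join " " (PySem.List.slice parts (some i) none)
  | none => ""

-- invariant: A's loop from index j, with its message rule, equals B's peel of the suffix
lemma loopA_peel (parts : List String) : ∀ (k j : Nat), j + k = parts.length → ∀ (users : List String),
    (let r := pvLoopA parts (PySem.List.pyRange (j : Int) (parts.length : Int) 1) users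
     (r.1, pvMsgA parts r.2)) =
      (users ++ (pvPeel (parts.drop j)).1, (pvPeel (parts.drop j)).2) := by
  intro k
  induction k with
  | zero =>
    intro j hj users
    have hjj : j = parts.length := by omega
    subst hjj
    rw [PySem.List.pyRange_one_eq_nil (by omega)]
    simp [pvLoopA, pvMsgA, pvPeel, PySem.Str.join]
  | succ k ih =>
    intro j hj users
    have hjl : j < parts.length := by omega
    have hget : PySem.List.pyGet? parts (j : Int) = some parts[j] := by
      rw [PySem.List.pyGet?_natCast]
      simp [hjl]
    have hdrop : parts.drop j = parts[j] :: parts.drop (j + 1) :=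
      List.drop_eq_getElem_cons hjl
    rw [PySem.List.pyRange_one_cons (by exact_mod_cast hjl)]
    have hcast : ((j + 1 : Nat) : Int) = (j : Int) + 1 := by push_cast; ring
    by_cases hs : PySem.Str.startswith parts[j] "@" = true
    · -- '@'-token: A appends its tail to users, B conses it on the unwind
      have hrec := ih (j + 1) (by omega) (users ++ [PySem.Str.slice parts[j] (some 1) none])
      rw [hcast] at hrec
      simp only [pvLoopA, hget, Option.getD_some, hs, if_true]
      rw [hrec, hdrop]
      have hpeel : pvPeel (parts[j] :: parts.drop (j + 1)) =
          (PySem.Str.slice parts[j] (some 1) none :: (pvPeel (parts.drop (j + 1))).1,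
           (pvPeel (parts.drop (j + 1))).2) := by
        simp only [pvPeel]
        rw [if_pos hs]
      rw [hpeel]
      simp
    · -- first non-'@' token: A breaks with index j, B joins the suffix directly
      have hs' : PySem.Str.startswith parts[j] "@" = false := by
        cases hsv : PySem.Str.startswith parts[j] "@"
        · rfl
        · exact absurd hsv hs
      simp only [pvLoopA, hget, Option.getD_some, hs', Bool.false_eq_true, if_false]
      rw [hdrop]
      simp only [pvPeel, hs', Bool.false_eq_true, if_false, pvMsgA]
      rw [PySem.List.slice_from parts (by omega), Int.toNat_natCast, hdrop]
      simp

-- the two bodies agree on every token list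
lemma body_eq (parts : List String) : pvBodyA parts = pvBodyB parts := by
  unfold pvBodyA pvBodyB
  by_cases h1 : parts = []
  · rw [if_pos h1, if_pos h1]
  · rw [if_neg h1, if_neg h1]
    by_cases h2 : PySem.List.pyGet? parts 0 ≠ some ".temp"
    · rw [if_pos h2, if_pos h2]
    · rw [if_neg h2, if_neg h2]
      have hlen : 1 ≤ parts.length := by
        cases parts with
        | nil => exact absurd rfl h1
        | cons a l => simp
      have hmain := loopA_peel parts (parts.length - 1) 1 (by omega) []
      simp only [Nat.cast_one, List.nil_append] at hmain
      rcases hr : pvLoopA parts (PySem.List.pyRange 1 (parts.length : Int) 1) [] with ⟨u, o⟩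
      rw [hr] at hmain
      have hu : u = (pvPeel (parts.drop 1)).1 := congrArg Prod.fst hmain
      have hm : pvMsgA parts o = (pvPeel (parts.drop 1)).2 := congrArg Prod.snd hmain
      rw [PySem.List.slice_from_one, ← List.drop_one]
      simp only [pvMsgA] at hm
      cases o with
      | none => exact congrArg some (Prod.ext hu hm)
      | some i => exact congrArg some (Prod.ext hu hm)

-- ===== VERDICT (by name: the statement is the Claim_ definition above) =====
theorem extract_temp_message_spec : Claim_equal_extract_temp_message := by
  unfold Claim_equal_extract_temp_message Spec_extract_temp_message
  intro s _
  unfold extract_temp_message extract_temp_message_alt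
  exact body_eq _
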